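-- pv_equiv track=rewrite | github.com/leontnhaps/PTCamera_waveshare | Com/gui.py | _irange
-- ===== SOURCE A (Python) =====
-- def _irange(start:int, end:int, step:int):
--     if step <= 0: raise ValueError("step must be > 0")
--     vals=[]; v=start
--     if start<=end:
--         while v<=end: vals.append(v); v+=step
--     else:
--         while v>=end: vals.append(v); v-=step
--     return vals
-- ===== SOURCE B (Python) =====
-- def _irange(start: int, end: int, step: int):
--     if step <= 0: raise ValueError("step must be > 0")
--     sign = 1 if start <= end else -1
--     count = (end - start) * sign // step + 1
--     return [start + sign * step * i for i in range(count)]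
-- ===== Notes on version B (the rewrite author's own statement) =====
-- stated objective: simpler
-- what changed: Replaces the two-branch while-loop stepping a mutable variable with a closed-form element count (distance//step + 1) and a single list comprehension indexed by range, folding ascending/descending into a sign factor.
import Mathlib
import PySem

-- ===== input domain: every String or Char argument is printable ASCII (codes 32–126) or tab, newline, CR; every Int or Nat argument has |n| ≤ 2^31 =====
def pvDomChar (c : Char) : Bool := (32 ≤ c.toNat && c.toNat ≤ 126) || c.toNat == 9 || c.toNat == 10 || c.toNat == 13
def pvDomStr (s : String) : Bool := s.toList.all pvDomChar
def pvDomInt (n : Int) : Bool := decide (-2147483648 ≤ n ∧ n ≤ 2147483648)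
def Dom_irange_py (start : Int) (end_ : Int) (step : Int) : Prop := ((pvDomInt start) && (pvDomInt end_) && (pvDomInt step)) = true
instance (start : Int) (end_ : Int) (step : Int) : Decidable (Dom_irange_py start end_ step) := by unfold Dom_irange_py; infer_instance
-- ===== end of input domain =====

-- B replaces the two-branch while loop with a closed-form element count and one
-- indexed list comprehension (objective: simpler).

-- ===== PORT A =====
-- the ascending while loop 'while v<=end: vals.append(v); v+=step'
-- (the 0 < step conjunct is a termination guard only; A checks it once before the loop)
def irangeUp (end_ step v : Int) : List Int :=
  if _h : 0 < step ∧ v ≤ end_ then v :: irangeUp end_ step (v + step) else []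
termination_by (end_ + 1 - v).toNat
decreasing_by omega

-- the descending while loop 'while v>=end: vals.append(v); v-=step'
def irangeDown (end_ step v : Int) : List Int :=
  if _h : 0 < step ∧ end_ ≤ v then v :: irangeDown end_ step (v - step) else []
termination_by (v + 1 - end_).toNat
decreasing_by omega

def irange_py (start : Int) (end_ : Int) (step : Int) : List Int :=
  if step ≤ 0 then []  -- Python raises ValueError here; excluded by Pre_
  else if start ≤ end_ then irangeUp end_ step start
  else irangeDown end_ step start

-- ===== PORT B =====
def irange_py_alt (start : Int) (end_ : Int) (step : Int) : List Int :=
  if step ≤ 0 then []  -- Python raises ValueError here; excluded by Pre_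
  else
    let sign : Int := if start ≤ end_ then 1 else -1
    let count : Int := PySem.Int.floordiv ((end_ - start) * sign) step + 1
    (PySem.List.pyRange 0 count 1).map (fun i => start + sign * step * i)

-- ===== PRECONDITION & SPEC =====
-- A raises ValueError when step ≤ 0; those inputs are excluded.
def Pre_irange_py (start : Int) (end_ : Int) (step : Int) : Prop := 0 < step
instance (start : Int) (end_ : Int) (step : Int) : Decidable (Pre_irange_py start end_ step) := by unfold Pre_irange_py; infer_instance
def pvWitness_irange_py : Int × Int × Int := (0, 7, 2)

def Spec_irange_py (start : Int) (end_ : Int) (step : Int) (out : List Int) : Prop := out = irange_py_alt start end_ step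
instance (start : Int) (end_ : Int) (step : Int) (out : List Int) : Decidable (Spec_irange_py start end_ step out) := by unfold Spec_irange_py; infer_instance

-- ===== CLAIM (what is proved, stated in full; the proofs are below) =====
def Claim_equal_irange_py : Prop := ∀ (start : Int) (end_ : Int) (step : Int), Dom_irange_py start end_ step → Pre_irange_py start end_ step → Spec_irange_py start end_ step (irange_py start end_ step)

-- ===== LEMMAS AND PROOFS =====

lemma map_range_shift_add (step w : Int) (m : Nat) :
    (List.range (m + 1)).map (fun i : Nat => w + step * (i : Int)) =
      w :: (List.range m).map (fun i : Nat => (w + step) + step * (i : Int)) := by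
  rw [List.range_succ_eq_map, List.map_cons, List.map_map]
  congr 1
  · simp
  · apply List.map_congr_left; intro i _; simp [Function.comp]; push_cast; ring

lemma map_range_shift_sub (step w : Int) (m : Nat) :
    (List.range (m + 1)).map (fun i : Nat => w - step * (i : Int)) =
      w :: (List.range m).map (fun i : Nat => (w - step) - step * (i : Int)) := by
  rw [List.range_succ_eq_map, List.map_cons, List.map_map]
  congr 1
  · simp
  · apply List.map_congr_left; intro i _; simp [Function.comp]; push_cast; ring

lemma irangeUp_eq (end_ step : Int) (hs : 0 < step) :
    ∀ (n : Nat) (v : Int), v ≤ end_ → step * n ≤ end_ - v → end_ - v < step * (n + 1) →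
      irangeUp end_ step v = (List.range (n + 1)).map (fun i : Nat => v + step * (i : Int)) := by
  intro n
  induction n with
  | zero =>
      intro v hv _ hub
      rw [irangeUp, dif_pos ⟨hs, hv⟩, irangeUp, dif_neg]
      · simp
      · push_cast at hub; rintro ⟨-, h⟩; linarith
  | succ n ih =>
      intro v hv hlb hub
      have h0 : (0:Int) ≤ step * n := mul_nonneg hs.le (by positivity)
      push_cast at hlb hub
      have hv' : v + step ≤ end_ := by nlinarith
      rw [irangeUp, dif_pos ⟨hs, hv⟩,
          ih (v + step) hv' (by linarith) (by linarith),
          map_range_shift_add step v (n + 1)]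

lemma irangeDown_eq (end_ step : Int) (hs : 0 < step) :
    ∀ (n : Nat) (v : Int), end_ ≤ v → step * n ≤ v - end_ → v - end_ < step * (n + 1) →
      irangeDown end_ step v = (List.range (n + 1)).map (fun i : Nat => v - step * (i : Int)) := by
  intro n
  induction n with
  | zero =>
      intro v hv _ hub
      rw [irangeDown, dif_pos ⟨hs, hv⟩, irangeDown, dif_neg]
      · simp
      · push_cast at hub; rintro ⟨-, h⟩; linarith
  | succ n ih =>
      intro v hv hlb hub
      have h0 : (0:Int) ≤ step * n := mul_nonneg hs.le (by positivity)
      push_cast at hlb hub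
      have hv' : end_ ≤ v - step := by nlinarith
      rw [irangeDown, dif_pos ⟨hs, hv⟩,
          ih (v - step) hv' (by linarith) (by linarith),
          map_range_shift_sub step v (n + 1)]

-- floor-division characterisation of the loop count, for a nonnegative distance
lemma count_bounds (d step : Int) (hs : 0 < step) (hd : 0 ≤ d) :
    step * (d / step) ≤ d ∧ d < step * (d / step + 1) ∧ 0 ≤ d / step := by
  have h1 := Int.emod_nonneg d (by omega : step ≠ 0)
  have h2 := Int.emod_lt_of_pos d hs
  have h3 := Int.mul_ediv_add_emod d step
  exact ⟨by linarith, by nlinarith, Int.ediv_nonneg hd hs.le⟩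

-- ===== VERDICT (by name: the statement is the Claim_ definition above) =====
theorem irange_py_spec : Claim_equal_irange_py := by
  intro start end_ step _ hs
  unfold Pre_irange_py at hs
  have hns : ¬ step ≤ 0 := by omega
  unfold Spec_irange_py irange_py
  simp only [irange_py_alt]
  rw [if_neg hns, if_neg hns, PySem.Int.floordiv_eq_ediv_of_pos hs,
      PySem.List.pyRange_one, List.map_map]
  by_cases hle : start ≤ end_
  · rw [if_pos hle]
    simp only [if_pos hle, mul_one, one_mul]
    set d := end_ - start with hd
    obtain ⟨h1, h2, h3⟩ := count_bounds d step hs (by omega)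
    set q := d / step with hq
    have hqn : (q.toNat : Int) = q := Int.toNat_of_nonneg h3
    rw [irangeUp_eq end_ step hs q.toNat start (by omega) (by rw [hqn]; omega)
        (by rw [hqn]; nlinarith)]
    have hc : (q + 1 - 0).toNat = q.toNat + 1 := by omega
    rw [hc]
    apply List.map_congr_left; intro i _; simp [Function.comp]
  · rw [if_neg hle]
    simp only [if_neg hle]
    set d := start - end_ with hd
    have hdm : (end_ - start) * (-1) = d := by ring
    rw [hdm]
    obtain ⟨h1, h2, h3⟩ := count_bounds d step hs (by omega)
    set q := d / step with hq
    have hqn : (q.toNat : Int) = q := Int.toNat_of_nonneg h3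
    rw [irangeDown_eq end_ step hs q.toNat start (by omega) (by rw [hqn]; omega)
        (by rw [hqn]; nlinarith)]
    have hc : (q + 1 - 0).toNat = q.toNat + 1 := by omega
    rw [hc]
    apply List.map_congr_left; intro i _; simp [Function.comp]; ring
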